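-- pv_equiv track=rewrite | github.com/corundum/corundum | fpga/mqnic/NetFPGA_SUME/fpga/tb/test_fpga_core.py | frame_checksum
-- ===== SOURCE A (Python) =====
-- def frame_checksum(frame):
--     data = frame[14:]
--
--     csum = 0
--     odd = False
--
--     for b in data:
--         if odd:
--             csum += b
--         else:
--             csum += b << 8
--         odd = not odd
--
--     csum = (csum & 0xffff) + (csum >> 16)
--     csum = (csum & 0xffff) + (csum >> 16)
--
--     return csum
-- ===== SOURCE B (Python) =====
-- def frame_checksum(frame):
--     data = frame[14:]
--     csum = (sum(data[0::2]) << 8) + sum(data[1::2])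
--     csum = (csum & 0xffff) + (csum >> 16)
--     csum = (csum & 0xffff) + (csum >> 16)
--     return csum
-- ===== Notes on version B (the rewrite author's own statement) =====
-- stated objective: simpler
-- what changed: Replaces the toggling odd/even accumulator loop by two stride-2 slice sums (high bytes shifted, low bytes plain) followed by the same two carry folds.
import Mathlib
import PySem

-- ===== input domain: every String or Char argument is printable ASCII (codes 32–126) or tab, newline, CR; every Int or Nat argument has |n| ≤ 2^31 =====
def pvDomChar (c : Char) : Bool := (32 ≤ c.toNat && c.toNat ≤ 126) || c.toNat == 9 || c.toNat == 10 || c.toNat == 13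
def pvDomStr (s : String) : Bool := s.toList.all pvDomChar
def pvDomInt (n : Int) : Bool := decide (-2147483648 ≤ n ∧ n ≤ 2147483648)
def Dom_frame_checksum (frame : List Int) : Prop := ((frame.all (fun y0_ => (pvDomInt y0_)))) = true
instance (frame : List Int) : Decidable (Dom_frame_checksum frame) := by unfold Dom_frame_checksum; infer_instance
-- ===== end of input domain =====

-- B computes the checksum as two stride-2 slice sums instead of A's toggling loop (objective: simpler).
-- ===== PORT A =====
def csumStep (st : Int × Bool) (b : Int) : Int × Bool :=
  if st.2 then (st.1 + b, !st.2) else (st.1 + (b <<< (8 : Nat)), !st.2)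

def frame_checksum (frame : List Int) : Int :=
  let data := PySem.List.slice frame (some 14) none
  let csum := (data.foldl csumStep (0, false)).1
  let csum := PySem.Int.band csum 0xffff + csum >>> (16 : Nat)
  let csum := PySem.Int.band csum 0xffff + csum >>> (16 : Nat)
  csum

-- ===== PORT B =====
-- sum of data[0::2] (stride-2 slice sum)
def sumStride2 : List Int → Int
  | [] => 0
  | a :: rest => a + sumStride2 rest.tail
termination_by l => l.length
decreasing_by simp [List.length_tail]

def frame_checksum_alt (frame : List Int) : Int :=
  let data := PySem.List.slice frame (some 14) none
  let csum := (sumStride2 data) <<< (8 : Nat) + sumStride2 data.tail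
  let csum := PySem.Int.band csum 0xffff + csum >>> (16 : Nat)
  let csum := PySem.Int.band csum 0xffff + csum >>> (16 : Nat)
  csum

-- ===== PRECONDITION & SPEC =====
def Spec_frame_checksum (frame : List Int) (out : Int) : Prop := out = frame_checksum_alt frame
instance (frame : List Int) (out : Int) : Decidable (Spec_frame_checksum frame out) := by unfold Spec_frame_checksum; infer_instance

-- ===== CLAIM (what is proved, stated in full; the proofs are below) =====
def Claim_equal_frame_checksum : Prop := ∀ (frame : List Int), Dom_frame_checksum frame → Spec_frame_checksum frame (frame_checksum frame)

-- ===== LEMMAS AND PROOFS =====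

-- ===== VERDICT (by name: the statement is the Claim_ definition above) =====
@[simp] lemma sumStride2_nil : sumStride2 [] = 0 := by rw [sumStride2]

@[simp] lemma sumStride2_cons (a : Int) (l : List Int) :
    sumStride2 (a :: l) = a + sumStride2 l.tail := by rw [sumStride2]

lemma foldl_csum (data : List Int) : ∀ c : Int,
    ((data.foldl csumStep (c, false)).1
      = c + (sumStride2 data) <<< (8 : Nat) + sumStride2 data.tail) ∧
    ((data.foldl csumStep (c, true)).1
      = c + sumStride2 data + (sumStride2 data.tail) <<< (8 : Nat)) := by
  induction data with
  | nil => intro c; simp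
  | cons a rest ih =>
    intro c
    constructor
    · rw [List.foldl_cons]
      simp only [csumStep]
      norm_num
      rw [(ih (c + a <<< (8 : Nat))).2]
      simp only [Int.shiftLeft_eq]
      ring
    · rw [List.foldl_cons]
      simp only [csumStep]
      norm_num
      rw [(ih (c + a)).1]
      simp only [Int.shiftLeft_eq]
      ring

theorem frame_checksum_spec : Claim_equal_frame_checksum := by
  intro frame _
  unfold Spec_frame_checksum frame_checksum frame_checksum_alt
  dsimp only
  rw [(foldl_csum (PySem.List.slice frame (some 14) none) 0).1, zero_add]
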